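-- pv_equiv track=rewrite | github.com/shzheng-po/Code-Search | CodeSearch.py | trimUrls
-- ===== SOURCE A (Python) =====
-- def trimUrls(urls, kwords):  # filter urls for keywords
--
--     # instantiate list to store urls with a keyword
--     key_hrefs = []
--
--     # finds urls that contains keywords
--     for url in urls:
--         for kword in kwords:
--             # splits url by '/' and store as lists of string objects
--             temp = url.split('/')
--             # instantiate a variable to store the index with which keyword is found within the list of strings
--             j = 0
--             for i in range(len(temp)):
--                 # gets the last index within the string
--                 if temp[i].find(kword) != -1:
--                     j = i
--
--             # returns lists of url segments
--             tempurlseg = temp[:j+1]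
--
--             # build a workable url link from list so url segments
--             tempurl = ''
--             if j != 0:
--                 for seg in tempurlseg:
--                     tempurl = tempurl+seg+'/'
--             else:
--                 continue
--             # add to key-hrefs
--             key_hrefs.append(tempurl)
--
--     # remove duplicates
--     key_hrefs = list(dict.fromkeys(key_hrefs))
--
--     return(key_hrefs)
-- ===== SOURCE B (Python) =====
-- def trimUrls(urls, kwords):  # filter urls for keywords
--     out = []
--     for url in urls:
--         segs = url.split('/')
--         # single forward pass over segments: running prefix strings and a
--         # dict mapping each keyword to the last segment index containing it
--         prefixes = []
--         run = ''
--         last = {}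
--         for i, seg in enumerate(segs):
--             run = run + seg + '/'
--             prefixes.append(run)
--             for kw in kwords:
--                 if kw in seg:
--                     last[kw] = i
--         # emit: one O(1) lookup per keyword
--         for kw in kwords:
--             j = last.get(kw, 0)
--             if j != 0:
--                 out.append(prefixes[j])
--     return list(dict.fromkeys(out))
-- ===== Notes on version B (the rewrite author's own statement) =====
-- stated objective: faster
-- what changed: B transposes A's nested loops: instead of re-splitting the url and re-scanning all segments and rebuilding the prefix string per keyword, B makes one forward pass over the segments per url, maintaining running prefix strings and a dict keyword->last-matching-index, then emits each keyword's answer by an O(1) dict lookup and list index; dedup stays dict.fromkeys.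
import Mathlib
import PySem

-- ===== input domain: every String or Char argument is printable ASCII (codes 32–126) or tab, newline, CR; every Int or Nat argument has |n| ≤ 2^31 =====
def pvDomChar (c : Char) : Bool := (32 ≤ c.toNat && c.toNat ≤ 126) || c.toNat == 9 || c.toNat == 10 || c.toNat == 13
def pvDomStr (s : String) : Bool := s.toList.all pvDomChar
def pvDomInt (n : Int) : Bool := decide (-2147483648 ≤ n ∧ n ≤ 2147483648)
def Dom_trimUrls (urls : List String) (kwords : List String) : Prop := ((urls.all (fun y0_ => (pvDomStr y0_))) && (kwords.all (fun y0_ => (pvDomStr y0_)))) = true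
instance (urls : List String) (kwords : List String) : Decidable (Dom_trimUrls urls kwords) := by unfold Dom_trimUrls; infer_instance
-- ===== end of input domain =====

-- B transposes A's loops: one forward pass per url builds running prefix strings and a
-- dict keyword -> last matching segment index, then each keyword is emitted by an O(1)
-- lookup (alternative decomposition; dedup stays at the end).

-- ===== PORT A =====
def trimUrls (urls : List String) (kwords : List String) : List String :=
  let key_hrefs : List String :=
    urls.foldl (fun key_hrefs url =>
      kwords.foldl (fun key_hrefs kword =>
        let temp := (PySem.Str.split? url "/").getD []   -- sep "/" ≠ "": split? is always some
        let j : Int :=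
          (PySem.List.pyRange 0 (temp.length : Int) 1).foldl
            (fun j i => if PySem.Str.find (PySem.List.pyGetD temp i "") kword ≠ -1 then i else j) 0
        let tempurlseg := PySem.List.slice temp none (some (j + 1))
        if j ≠ 0 then
          key_hrefs ++ [tempurlseg.foldl (fun tempurl seg => tempurl ++ seg ++ "/") ""]
        else key_hrefs) key_hrefs) []
  PySem.List.dedup key_hrefs

-- ===== PORT B =====
def trimUrls_alt (urls : List String) (kwords : List String) : List String :=
  let out : List String :=
    urls.foldl (fun out url =>
      let segs := (PySem.Str.split? url "/").getD []   -- sep "/" ≠ "": split? is always some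
      -- single forward pass: running prefixes and dict kw -> last matching index
      let st :=
        (PySem.List.enumerate segs).foldl
          (fun (st : String × List String × PySem.Dict String Int) iseg =>
            let run := st.1 ++ iseg.2 ++ "/"
            let prefixes := st.2.1 ++ [run]
            let last := kwords.foldl (fun d kw =>
              if PySem.Str.isIn kw iseg.2 then d.insert kw iseg.1 else d) st.2.2
            (run, prefixes, last))
          ("", ([], PySem.Dict.empty))
      kwords.foldl (fun out kw =>
        let j := st.2.2.getD kw 0
        if j ≠ 0 then out ++ [PySem.List.pyGetD st.2.1 j ""] else out) out) []
  PySem.List.dedup out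

-- ===== PRECONDITION & SPEC =====
def Spec_trimUrls (urls : List String) (kwords : List String) (out : List String) : Prop := out = trimUrls_alt urls kwords
instance (urls : List String) (kwords : List String) (out : List String) : Decidable (Spec_trimUrls urls kwords out) := by unfold Spec_trimUrls; infer_instance

-- ===== CLAIM (what is proved, stated in full; the proofs are below) =====
def Claim_equal_trimUrls : Prop := ∀ (urls : List String) (kwords : List String), Dom_trimUrls urls kwords → Spec_trimUrls urls kwords (trimUrls urls kwords)

-- ===== LEMMAS AND PROOFS =====

-- last matching index over the first n segments, default 0 (forward, keep last)
def pvLastM (p : Nat → Bool) : Nat → Int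
  | 0 => 0
  | n+1 => if p n then (n : Int) else pvLastM p n

theorem pvLastM_nonneg (p : Nat → Bool) (n : Nat) : 0 ≤ pvLastM p n := by
  induction n with
  | zero => simp [pvLastM]
  | succ n ih =>
    simp only [pvLastM]
    split_ifs with h
    · positivity
    · exact ih

theorem pvLastM_lt (p : Nat → Bool) (n : Nat) (h : pvLastM p n ≠ 0) : pvLastM p n < (n : Int) := by
  induction n with
  | zero => simp [pvLastM] at h
  | succ n ih =>
    by_cases hp : p n
    · simp [pvLastM, hp]
    · simp [pvLastM, hp] at h ⊢
      have := ih h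
      omega

theorem pvLastM_congr {p q : Nat → Bool} (n : Nat) (h : ∀ i, i < n → p i = q i) :
    pvLastM p n = pvLastM q n := by
  induction n with
  | zero => rfl
  | succ n ih =>
    simp only [pvLastM, h n (by omega), ih (fun i hi => h i (by omega))]

-- A's forward scan keeping the last match equals pvLastM
theorem pvJA_eq (segs : List String) (kw : String) (n : Nat) :
    (PySem.List.pyRange 0 (n : Int) 1).foldl
      (fun j i => if PySem.Str.find (PySem.List.pyGetD segs i "") kw ≠ -1 then i else j) 0
    = pvLastM (fun i => PySem.Str.isIn kw (PySem.List.pyGetD segs (i : Int) "")) n := by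
  induction n with
  | zero => simp [PySem.List.pyRange_one_eq_nil (le_refl 0), pvLastM]
  | succ n ih =>
    have hc : ((n + 1 : Nat) : Int) = (n : Int) + 1 := by push_cast; ring
    rw [hc, PySem.List.pyRange_one_succ_right (by positivity), List.foldl_append]
    simp only [List.foldl_cons, List.foldl_nil, ih, pvLastM]
    have hiff : (PySem.Str.find (PySem.List.pyGetD segs (n : Int) "") kw ≠ -1)
        ↔ (PySem.Str.isIn kw (PySem.List.pyGetD segs (n : Int) "") = true) := by
      rw [ne_eq, PySem.Str.find_eq_neg_one_iff, PySem.Str.isIn_iff_infix, not_not]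
    by_cases hp : PySem.Str.isIn kw (PySem.List.pyGetD segs (n : Int) "") = true
    · rw [if_pos (hiff.mpr hp), if_pos hp]
    · rw [if_neg (fun hf => hp (hiff.mp hf)), if_neg hp]

-- the manual running concatenation
def pvCat (xs : List String) : String := xs.foldl (fun t s => t ++ s ++ "/") ""

-- B's dict update for one segment: lookup afterwards
theorem pvCat_snoc (xs : List String) (x : String) :
    pvCat (xs ++ [x]) = pvCat xs ++ x ++ "/" := by
  rw [pvCat, pvCat, List.foldl_append]
  rfl

theorem pvDictStep (kwords : List String) (seg : String) (i : Int)
    (d : PySem.Dict String Int) (kw : String) :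
    (kwords.foldl (fun d kw' => if PySem.Str.isIn kw' seg then d.insert kw' i else d) d).getD kw 0
    = if kw ∈ kwords ∧ PySem.Str.isIn kw seg then i else d.getD kw 0 := by
  induction kwords generalizing d with
  | nil => simp
  | cons k rest ih =>
    simp only [List.foldl_cons]
    by_cases hk : PySem.Str.isIn k seg = true
    · rw [if_pos hk, ih]
      by_cases hmem : kw ∈ rest ∧ PySem.Str.isIn kw seg = true
      · rw [if_pos hmem, if_pos ⟨List.mem_cons_of_mem _ hmem.1, hmem.2⟩]
      · rw [if_neg hmem, PySem.Dict.getD_insert]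
        by_cases he : kw = k
        · subst he
          rw [if_pos rfl, if_pos ⟨List.mem_cons_self, hk⟩]
        · rw [if_neg he, if_neg (fun h => hmem ⟨(List.mem_cons.mp h.1).resolve_left he, h.2⟩)]
    · rw [if_neg hk, ih]
      by_cases hmem : kw ∈ rest ∧ PySem.Str.isIn kw seg = true
      · rw [if_pos hmem, if_pos ⟨List.mem_cons_of_mem _ hmem.1, hmem.2⟩]
      · rw [if_neg hmem]
        by_cases hc : kw ∈ k :: rest ∧ PySem.Str.isIn kw seg = true
        · rcases hc with ⟨hc1, hc2⟩
          rcases List.mem_cons.mp hc1 with he | hr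
          · subst he; exact absurd hc2 (by simpa using hk)
          · exact absurd ⟨hr, hc2⟩ hmem
        · rw [if_neg hc]

-- B's single forward pass, characterised (snoc induction)
theorem pvScan (kwords : List String) (segs : List String) :
    ((PySem.List.enumerate segs).foldl
      (fun (st : String × List String × PySem.Dict String Int) iseg =>
        let run := st.1 ++ iseg.2 ++ "/"
        let prefixes := st.2.1 ++ [run]
        let last := kwords.foldl (fun d kw =>
          if PySem.Str.isIn kw iseg.2 then d.insert kw iseg.1 else d) st.2.2
        (run, prefixes, last))
      ("", ([], PySem.Dict.empty)))
    = (pvCat segs,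
       ((List.range segs.length).map (fun k => pvCat (segs.take (k+1))),
        ((PySem.List.enumerate segs).foldl
          (fun (d : PySem.Dict String Int) iseg =>
            kwords.foldl (fun d kw =>
              if PySem.Str.isIn kw iseg.2 then d.insert kw iseg.1 else d) d)
          PySem.Dict.empty)))
    ∧ ∀ kw ∈ kwords,
        ((PySem.List.enumerate segs).foldl
          (fun (d : PySem.Dict String Int) iseg =>
            kwords.foldl (fun d kw =>
              if PySem.Str.isIn kw iseg.2 then d.insert kw iseg.1 else d) d)
          PySem.Dict.empty).getD kw 0
        = pvLastM (fun i => PySem.Str.isIn kw (PySem.List.pyGetD segs (i : Int) "")) segs.length := by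
  induction segs using List.reverseRecOn with
  | nil =>
    constructor
    · simp [PySem.List.enumerate, pvCat]
    · intro kw _
      simp [PySem.List.enumerate, pvLastM]
  | append_singleton segs x ih =>
    have henum : PySem.List.enumerate (segs ++ [x]) 0
        = PySem.List.enumerate segs 0 ++ [((segs.length : Int), x)] := by
      rw [PySem.List.enumerate_append]
      simp [PySem.List.enumerate_cons, PySem.List.enumerate_nil]
    rcases ih with ⟨ih1, ih2⟩
    constructor
    · rw [henum, List.foldl_append, List.foldl_append, ih1]
      simp only [List.foldl_cons, List.foldl_nil]
      refine Prod.ext ?_ (Prod.ext ?_ rfl)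
      · show pvCat segs ++ x ++ "/" = pvCat (segs ++ [x])
        rw [pvCat_snoc]
      · show (List.range segs.length).map (fun k => pvCat (segs.take (k+1))) ++ [pvCat segs ++ x ++ "/"]
            = (List.range (segs ++ [x]).length).map (fun k => pvCat ((segs ++ [x]).take (k+1)))
        rw [List.length_append, List.length_singleton, List.range_succ, List.map_append]
        congr 1
        · apply List.map_congr_left
          intro k hk
          rw [List.mem_range] at hk
          rw [List.take_append_of_le_length (by omega)]
        · simp only [List.map_cons, List.map_nil]
          congr 1
          rw [List.take_of_length_le (by simp), pvCat_snoc]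
    · intro kw hkw
      rw [henum, List.foldl_append]
      simp only [List.foldl_cons, List.foldl_nil]
      rw [pvDictStep, ih2 kw hkw]
      have hx : PySem.List.pyGetD (segs ++ [x]) ((segs.length : Nat) : Int) "" = x := by
        rw [PySem.List.pyGetD_natCast]
        simp
      rw [List.length_append, List.length_singleton]
      have hstep : pvLastM (fun i => PySem.Str.isIn kw (PySem.List.pyGetD (segs ++ [x]) (i : Int) "")) (segs.length + 1)
          = if PySem.Str.isIn kw x then (segs.length : Int)
            else pvLastM (fun i => PySem.Str.isIn kw (PySem.List.pyGetD (segs ++ [x]) (i : Int) "")) segs.length := by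
        simp only [pvLastM, hx]
      rw [hstep]
      have hcong : pvLastM (fun i => PySem.Str.isIn kw (PySem.List.pyGetD (segs ++ [x]) (i : Int) "")) segs.length
          = pvLastM (fun i => PySem.Str.isIn kw (PySem.List.pyGetD segs (i : Int) "")) segs.length := by
        apply pvLastM_congr
        intro i hi
        rw [PySem.List.pyGetD_natCast, PySem.List.pyGetD_natCast]
        congr 1
        simp [List.getD_eq_getElem?_getD, List.getElem?_append_left hi]
      rw [hcong]
      by_cases hxm : PySem.Str.isIn kw x = true
      · rw [if_pos hxm, if_pos ⟨hkw, hxm⟩]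
      · rw [if_neg hxm, if_neg (fun h => hxm h.2)]

-- per-(url,kword) step equality, for kw in kwords
theorem pvEmit_eq (kwords : List String) (segs : List String) (kw : String) (hkw : kw ∈ kwords)
    (out : List String) :
    (let st :=
        (PySem.List.enumerate segs).foldl
          (fun (st : String × List String × PySem.Dict String Int) iseg =>
            let run := st.1 ++ iseg.2 ++ "/"
            let prefixes := st.2.1 ++ [run]
            let last := kwords.foldl (fun d kw =>
              if PySem.Str.isIn kw iseg.2 then d.insert kw iseg.1 else d) st.2.2
            (run, prefixes, last))
          ("", ([], PySem.Dict.empty))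
     let j := st.2.2.getD kw 0
     if j ≠ 0 then out ++ [PySem.List.pyGetD st.2.1 j ""] else out)
    = (let j : Int :=
         (PySem.List.pyRange 0 (segs.length : Int) 1).foldl
           (fun j i => if PySem.Str.find (PySem.List.pyGetD segs i "") kw ≠ -1 then i else j) 0
       let tempurlseg := PySem.List.slice segs none (some (j + 1))
       if j ≠ 0 then
         out ++ [tempurlseg.foldl (fun tempurl seg => tempurl ++ seg ++ "/") ""]
       else out) := by
  rcases pvScan kwords segs with ⟨h1, h2⟩
  simp only [h1, pvJA_eq segs kw segs.length, h2 kw hkw]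
  set m := pvLastM (fun i => PySem.Str.isIn kw (PySem.List.pyGetD segs (i : Int) "")) segs.length with hm
  by_cases h0 : m = 0
  · simp [h0]
  · have hmlt : m < (segs.length : Int) := pvLastM_lt _ _ h0
    have hm0 : 0 ≤ m := pvLastM_nonneg _ _
    rw [if_pos h0, if_pos h0]
    congr 2
    -- prefixes[m] = pvCat (segs.take (m+1)) = A's built string
    rw [PySem.List.pyGetD_eq_getElem _ "" hm0 (by simpa using hmlt)]
    simp only [List.getElem_map, List.getElem_range]
    rw [PySem.List.slice_to segs (by omega : (0:Int) ≤ m + 1)]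
    have ht : (m + 1).toNat = m.toNat + 1 := by omega
    rw [ht, ← pvCat]

-- ===== VERDICT (by name: the statement is the Claim_ definition above) =====
theorem trimUrls_spec : Claim_equal_trimUrls := by
  intro urls kwords hdom
  show trimUrls urls kwords = trimUrls_alt urls kwords
  unfold trimUrls trimUrls_alt
  simp only []
  congr 1
  clear hdom
  induction urls using List.reverseRecOn with
  | nil => rfl
  | append_singleton urls url ih =>
    rw [List.foldl_append, List.foldl_append, ← ih]
    simp only [List.foldl_cons, List.foldl_nil]
    apply PySem.List.foldl_congr_mem
    intro acc kw hkw
    exact (pvEmit_eq kwords ((PySem.Str.split? url "/").getD []) kw hkw acc).symm
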